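-- pv_equiv track=rewrite | github.com/Marcin-Ramotowski/checkio-exercises | GitHub/the_highest_building.py | highest_building
-- ===== SOURCE A (Python) =====
-- def highest_building(buildings):
--     n = len(buildings[0])
--     heights = []
--     for i in range(n):
--         column = [t[i] for t in buildings]
--         height = column.count(1)
--         heights.append(height)
--     score = max(heights)
--     index = heights.index(score) + 1
--     return [index,score]
-- ===== SOURCE B (Python) =====
-- def highest_building(buildings):
--     # Row-major single pass with a running per-column tally (A extracts each
--     # column and calls .count on it, column-major).
--     counts = [0] * len(buildings[0])
--     for row in buildings:
--         counts = [c + 1 if v == 1 else c for c, v in zip(counts, row)]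
--     score = max(counts)
--     return [counts.index(score) + 1, score]
-- ===== Notes on version B (the rewrite author's own statement) =====
-- stated objective: alternative
-- what changed: B makes one row-major pass maintaining a per-column tally list (zip of counts with each row), instead of A's column-major loop that materialises every column with a per-column list comprehension and calls .count on it; Pre_ excludes only inputs where A raises (empty buildings, empty first row, or a row shorter than the first: IndexError/ValueError).
import Mathlib
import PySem

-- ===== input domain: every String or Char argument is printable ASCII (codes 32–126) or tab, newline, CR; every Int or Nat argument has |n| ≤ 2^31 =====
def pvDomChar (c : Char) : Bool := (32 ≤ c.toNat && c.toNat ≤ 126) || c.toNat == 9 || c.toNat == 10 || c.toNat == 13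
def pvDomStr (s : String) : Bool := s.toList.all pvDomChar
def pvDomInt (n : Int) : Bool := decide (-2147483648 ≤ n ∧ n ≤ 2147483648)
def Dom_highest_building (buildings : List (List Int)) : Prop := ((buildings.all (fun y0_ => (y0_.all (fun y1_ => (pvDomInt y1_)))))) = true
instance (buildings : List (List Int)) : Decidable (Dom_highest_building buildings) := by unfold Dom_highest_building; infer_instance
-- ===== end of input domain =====

-- B replaces A's column-major loop (materialise each column, .count it) by one
-- row-major pass maintaining a per-column tally list; same cost, different traversal.


-- ===== PORT A =====
def highest_building (buildings : List (List Int)) : List Int :=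
  let n : Int := PySem.List.len (PySem.List.pyGetD buildings 0 [])
  let heights : List Int := (PySem.List.pyRange 0 n 1).foldl (fun hs i =>
    let column := buildings.map (fun t => PySem.List.pyGetD t i 0)
    let height : Int := (PySem.List.count column 1 : Nat)
    hs ++ [height]) []
  let score : Int := (PySem.List.max? heights (fun x => x)).getD 0
  let index : Int := ((PySem.List.index? heights score).getD 0 : Nat) + 1
  [index, score]

-- ===== PORT B =====
def highest_building_alt (buildings : List (List Int)) : List Int :=
  let counts0 : List Int := PySem.List.pyRepeat [(0 : Int)] (PySem.List.len (PySem.List.pyGetD buildings 0 []))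
  let counts : List Int := buildings.foldl
    (fun cs row => (cs.zip row).map (fun p => if p.2 == 1 then p.1 + 1 else p.1)) counts0
  let score : Int := (PySem.List.max? counts (fun x => x)).getD 0
  [((PySem.List.index? counts score).getD 0 : Nat) + 1, score]

-- ===== PRECONDITION & SPEC =====
-- Pre_ excludes exactly the inputs on which the Python A raises: empty buildings
-- (IndexError on buildings[0]), an empty first row (max() of an empty sequence),
-- and a row shorter than the first row (IndexError on t[i]).
def Pre_highest_building (buildings : List (List Int)) : Prop :=
  buildings ≠ [] ∧ 0 < (buildings.headD []).length ∧
    ∀ row ∈ buildings, (buildings.headD []).length ≤ row.length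
instance (buildings : List (List Int)) : Decidable (Pre_highest_building buildings) := by
  unfold Pre_highest_building; infer_instance

def pvWitness_highest_building : List (List Int) := [[1, 0, 1], [1, 1, 1], [0, 1, 1]]

def Spec_highest_building (buildings : List (List Int)) (out : List Int) : Prop := out = highest_building_alt buildings
instance (buildings : List (List Int)) (out : List Int) : Decidable (Spec_highest_building buildings out) := by unfold Spec_highest_building; infer_instance

-- ===== CLAIM (what is proved, stated in full; the proofs are below) =====
def Claim_equal_highest_building : Prop := ∀ (buildings : List (List Int)), Dom_highest_building buildings → Pre_highest_building buildings → Spec_highest_building buildings (highest_building buildings)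

-- ===== LEMMAS AND PROOFS =====

-- the step of B's fold
def pvStep (cs row : List Int) : List Int :=
  (cs.zip row).map (fun p => if p.2 == 1 then p.1 + 1 else p.1)

lemma pvStep_length (cs row : List Int) (h : cs.length ≤ row.length) :
    (pvStep cs row).length = cs.length := by
  simp [pvStep]; omega

lemma pvStep_getD (cs row : List Int) (k : Nat) (hk : k < cs.length) (h : cs.length ≤ row.length) :
    (pvStep cs row).getD k 0 =
      if row.getD k 0 = 1 then cs.getD k 0 + 1 else cs.getD k 0 := by
  have hk2 : k < row.length := by omega
  have hz : k < (cs.zip row).length := by simp; omega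
  simp [pvStep, List.getD_eq_getElem?_getD, List.getElem?_eq_getElem hz,
    List.getElem?_eq_getElem hk, List.getElem?_eq_getElem hk2, List.getElem_zip]

-- invariant of B's fold: pointwise, each tally grows by the column count of the rows folded
lemma pvFold_eq (rows : List (List Int)) : ∀ (cs : List Int),
    (∀ r ∈ rows, cs.length ≤ r.length) →
    rows.foldl pvStep cs =
      (List.range cs.length).map
        (fun k => cs.getD k 0 + ((rows.map (fun t => t.getD k 0)).count 1 : Nat)) := by
  induction rows with
  | nil =>
    intro cs _
    apply List.ext_getElem
    · simp
    · intro k hk hk2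
      simp only [List.foldl_nil] at hk ⊢
      have hk' : k < cs.length := hk
      simp [List.getD_eq_getElem?_getD, List.getElem?_eq_getElem hk']
  | cons r rows ih =>
    intro cs h
    have hr : cs.length ≤ r.length := h r (by simp)
    have hlen := pvStep_length cs r hr
    have h' : ∀ r' ∈ rows, (pvStep cs r).length ≤ r'.length := by
      intro r' hr'; rw [hlen]; exact h r' (by simp [hr'])
    rw [List.foldl_cons, ih (pvStep cs r) h', hlen]
    apply List.map_congr_left
    intro k hk
    have hk' : k < cs.length := List.mem_range.mp hk
    rw [pvStep_getD cs r k hk' hr]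
    simp only [List.map_cons, List.count_cons, beq_iff_eq]
    split_ifs with hv <;> push_cast <;> ring

-- A's heights list equals B's counts list
lemma heights_eq_counts (buildings : List (List Int))
    (hpre : Pre_highest_building buildings) :
    (PySem.List.pyRange 0 (PySem.List.len (PySem.List.pyGetD buildings 0 [])) 1).foldl
      (fun hs i =>
        hs ++ [((PySem.List.count (buildings.map (fun t => PySem.List.pyGetD t i 0)) 1 : Nat) : Int)]) []
      =
    buildings.foldl
      (fun cs row => (cs.zip row).map (fun p => if p.2 == 1 then p.1 + 1 else p.1))
      (PySem.List.pyRepeat [(0 : Int)] (PySem.List.len (PySem.List.pyGetD buildings 0 []))) := by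
  obtain ⟨hne, hpos, hrows⟩ := hpre
  have h0 : PySem.List.pyGetD buildings 0 [] = buildings.headD [] := by
    cases buildings with
    | nil => simp at hne
    | cons b bs => simp [PySem.List.pyGetD_zero_cons]
  set n : Nat := (buildings.headD []).length with hn
  -- left side : map over the range
  rw [PySem.List.foldl_append_singleton_eq_map]
  have hlen : PySem.List.len (PySem.List.pyGetD buildings 0 []) = (n : Int) := by
    simp [h0, hn]
  rw [hlen, PySem.List.pyRange_zero_nat]
  -- right side via the fold invariant
  have hrep : PySem.List.pyRepeat [(0 : Int)] (n : Int) = List.replicate n 0 := by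
    simp [PySem.List.pyRepeat_singleton]
  have hfold := pvFold_eq buildings (List.replicate n (0 : Int))
    (by intro r hr; simpa using hrows r hr)
  rw [hrep]
  have hname : List.foldl
      (fun cs row => (cs.zip row).map (fun p => if p.2 == 1 then p.1 + 1 else p.1))
      (List.replicate n (0 : Int)) buildings
      = List.foldl pvStep (List.replicate n (0 : Int)) buildings := rfl
  rw [hname, hfold]
  simp only [List.length_replicate, List.map_map, List.nil_append]
  apply List.map_congr_left
  intro k hk
  have hk' : k < n := List.mem_range.mp hk
  simp [PySem.List.count_eq,
    List.getD_eq_getElem?_getD]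

-- ===== VERDICT (by name: the statement is the Claim_ definition above) =====
theorem highest_building_spec : Claim_equal_highest_building := by
  intro buildings _ hpre
  show _ = _
  unfold highest_building highest_building_alt
  have h := heights_eq_counts buildings hpre
  simp only []
  rw [PySem.List.foldl_append_singleton_eq_map] at h ⊢
  rw [h]
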